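-- pv_equiv track=rewrite | github.com/AlessandroGiulivo/prog2 | Exam1/word_composition.py | word_composition
-- ===== SOURCE A (Python) =====
-- def word_composition(s, k):
--     D = {}
--     n = len(s)
--     i = 0
--     while i <= n - k:
--         if s[i:i + k] in D:
--             D[s[i:i + k]] += 1
--             i += 1
--         else:
--             D[s[i:i + k]] = 1
--             i += 1
--     A = sorted(D)
--     R = {}
--     for e in A:
--         R[e] = D[e]
--     return R
-- ===== SOURCE B (Python) =====
-- def word_composition(s, k):
--     subs = sorted(s[i:i + k] for i in range(len(s) - k + 1))
--     R = {}
--     run = 0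
--     for j, sub in enumerate(subs):
--         run += 1
--         if j + 1 == len(subs) or subs[j + 1] != sub:
--             R[sub] = run
--             run = 0
--     return R
-- ===== Notes on version B (the rewrite author's own statement) =====
-- stated objective: alternative
-- what changed: Instead of hash-counting substrings with a dict and then sorting the keys and rebuilding a second dict, B extracts all k-slices into a list, sorts that list once, and emits (substring, run length) pairs by a consecutive-equal-run scan, so the result dict is built directly in sorted order in one pass.
import Mathlib
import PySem

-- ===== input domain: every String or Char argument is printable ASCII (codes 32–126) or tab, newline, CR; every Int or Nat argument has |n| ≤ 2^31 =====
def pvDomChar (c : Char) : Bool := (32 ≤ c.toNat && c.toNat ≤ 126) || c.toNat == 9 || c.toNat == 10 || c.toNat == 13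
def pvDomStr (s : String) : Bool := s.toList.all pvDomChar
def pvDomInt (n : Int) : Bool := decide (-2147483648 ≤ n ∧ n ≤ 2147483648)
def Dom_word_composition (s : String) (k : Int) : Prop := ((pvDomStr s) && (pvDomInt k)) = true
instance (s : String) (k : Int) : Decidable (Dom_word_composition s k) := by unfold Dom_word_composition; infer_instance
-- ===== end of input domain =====

-- B replaces A's hash-count-then-sort-keys-then-rebuild-dict by extract-slices, sort once,
-- and a consecutive-equal-run scan that builds the result dict directly in sorted order
-- (alternative decomposition; same return value).


-- ===== PORT A =====
-- s[i:i+k] as a String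
def wcSlice (s : String) (i k : Int) : String :=
  String.mk (PySem.List.slice s.toList (some i) (some (i + k)))

-- the 'while i <= n - k' counting loop of A; the Nat argument is pure fuel (the loop runs at
-- most (n - k + 1).toNat times), the loop's own exit test 'i <= n - k' is kept as in the Python
def wcLoopA (s : String) (n k : Int) : Nat → Int → PySem.Dict String Int → PySem.Dict String Int
  | 0, _, D => D
  | fuel + 1, i, D =>
    if i ≤ n - k then
      if D.contains (wcSlice s i k) then
        -- D[s[i:i+k]] += 1  (the key is present, so getD _ 0 is exactly D[key])
        wcLoopA s n k fuel (i + 1) (D.insert (wcSlice s i k) (D.getD (wcSlice s i k) 0 + 1))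
      else
        wcLoopA s n k fuel (i + 1) (D.insert (wcSlice s i k) 1)
    else D

def word_composition (s : String) (k : Int) : List (String × Int) :=
  let n : Int := (PySem.Str.len s : Int)
  let D := wcLoopA s n k (n - k + 1).toNat 0 PySem.Dict.empty
  let A := PySem.List.sorted D.keys (fun x => x) false
  -- for e in A: R[e] = D[e]   (e is a key of D, so getD _ 0 is exactly D[e])
  let R := A.foldl (fun r e => r.insert e (D.getD e 0)) PySem.Dict.empty
  R.items

-- ===== PORT B =====
-- the 'for j, sub in enumerate(subs)' scan of B: run counts the current streak of equal
-- neighbours; 'j + 1 == len(subs) or subs[j + 1] != sub' is the lookahead at the next element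
def wcScan : List String → Int → PySem.Dict String Int → PySem.Dict String Int
  | [], _, R => R
  | [x], run, R => R.insert x (run + 1)
  | x :: y :: rest, run, R =>
    if y == x then wcScan (y :: rest) (run + 1) R
    else wcScan (y :: rest) 0 (R.insert x (run + 1))

def word_composition_alt (s : String) (k : Int) : List (String × Int) :=
  -- sorted(generator of slices): ported as the stable merge sort under the same string order
  let subs := ((PySem.List.pyRange 0 ((PySem.Str.len s : Int) - k + 1) 1).map
      (fun i => String.mk (PySem.List.slice s.toList (some i) (some (i + k))))).mergeSort
    (fun a b => decide (a ≤ b))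
  (wcScan subs 0 PySem.Dict.empty).items

-- ===== PRECONDITION & SPEC =====
def Spec_word_composition (s : String) (k : Int) (out : List (String × Int)) : Prop := out = word_composition_alt s k
instance (s : String) (k : Int) (out : List (String × Int)) : Decidable (Spec_word_composition s k out) := by unfold Spec_word_composition; infer_instance

-- ===== CLAIM (what is proved, stated in full; the proofs are below) =====
def Claim_equal_word_composition : Prop := ∀ (s : String) (k : Int), Dom_word_composition s k → Spec_word_composition s k (word_composition s k)

-- ===== LEMMAS AND PROOFS =====

-- the list of all slices, in scan order
def wcL (s : String) (k : Int) : List String :=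
  (PySem.List.pyRange 0 ((PySem.Str.len s : Int) - k + 1) 1).map (fun i => wcSlice s i k)

-- (value, run length) for each maximal run of equal consecutive elements (proof-side mirror of
-- B's grouping, with the run for the head taken in one piece)
def wcRuns : List String → List (String × Int)
  | [] => []
  | x :: r =>
    (x, ((x :: r).length : Int) - ((List.dropWhile (fun y => y == x) (x :: r)).length : Int)) ::
      wcRuns (List.dropWhile (fun y => y == x) (x :: r))
termination_by l => l.length
decreasing_by
  simp only [List.dropWhile, BEq.rfl]
  have := (List.dropWhile_sublist (l := r) (p := fun y => y == x)).length_le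
  simp only [List.length_cons]; omega

-- B's scan, as a list of (value, run) pairs: the head's run is offset by the streak counter
def wcRunsOff : List String → Int → List (String × Int)
  | [], _ => []
  | [x], run => [(x, run + 1)]
  | x :: y :: rest, run =>
    if y == x then wcRunsOff (y :: rest) (run + 1)
    else (x, run + 1) :: wcRunsOff (y :: rest) 0

-- first element surviving dropWhile fails the predicate
lemma wc_dropWhile_head_false {a : Type} (p : a -> Bool) :
    forall (l : List a) {y : a} {ys : List a}, l.dropWhile p = y :: ys -> p y = false := by
  intro l
  induction l with
  | nil => intro y ys h; cases h
  | cons b l ih =>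
    intro y ys h
    rw [List.dropWhile_cons] at h
    by_cases hpb : p b
    · exact ih (by simpa [hpb] using h)
    · simp only [hpb, if_neg, Bool.false_eq_true, not_false_iff] at h
      cases h
      simpa using hpb

lemma wcLoopA_eq_foldl (s : String) (n k : Int) :
    ∀ (fuel : Nat) (i : Int) (D : PySem.Dict String Int), n - k + 1 - i ≤ fuel →
    wcLoopA s n k fuel i D =
      ((PySem.List.pyRange i (n - k + 1) 1).map (fun j => wcSlice s j k)).foldl
        (fun d x => d.insert x (d.getD x 0 + 1)) D := by
  intro fuel
  induction fuel with
  | zero =>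
    intro i D hfuel
    have hnil : PySem.List.pyRange i (n - k + 1) 1 = [] := by
      simp [PySem.List.pyRange]
      omega
    rw [hnil]
    rfl
  | succ fuel ih =>
    intro i D hfuel
    rw [wcLoopA]
    by_cases h : i ≤ n - k
    · rw [PySem.List.pyRange_one_cons (by omega)]
      simp only [List.map_cons, List.foldl_cons, if_pos h]
      by_cases hc : D.contains (wcSlice s i k)
      · rw [if_pos hc, ih (i + 1) _ (by omega)]
      · have hcf : D.contains (wcSlice s i k) = false := by simpa using hc
        have hg : D.getD (wcSlice s i k) 0 = 0 := PySem.Dict.getD_of_not_contains D 0 hcf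
        rw [if_neg hc, ih (i + 1) _ (by omega), hg, zero_add]
    · rw [if_neg h]
      have hnil : PySem.List.pyRange i (n - k + 1) 1 = [] := by
        simp [PySem.List.pyRange]
        omega
      rw [hnil]
      rfl

-- A's result in closed form: sorted distinct slices, each with its multiplicity
lemma word_composition_eq (s : String) (k : Int) :
    word_composition s k =
      (PySem.List.sorted (PySem.Set.ofList (wcL s k)) (fun x => x) false).map
        (fun e => (e, (List.count e (wcL s k) : Int))) := by
  unfold word_composition
  dsimp only
  rw [wcLoopA_eq_foldl s ((PySem.Str.len s : Int)) k _ 0 _ (by omega)]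
  rw [show (PySem.List.pyRange 0 ((PySem.Str.len s : Int) - k + 1) 1).map (fun j => wcSlice s j k) = wcL s k from rfl]
  rw [PySem.Dict.foldl_insert_getD_add_one_eq_counter, PySem.Dict.keys_counter]
  have hnd : (PySem.List.sorted (PySem.Set.ofList (wcL s k)) (fun x => x) false).Nodup :=
    (PySem.List.sorted_perm (PySem.Set.ofList (wcL s k)) (fun x => x) false).symm.nodup
      (PySem.Set.nodup_ofList (wcL s k))
  refine Eq.trans (b := (PySem.List.sorted (PySem.Set.ofList (wcL s k)) (fun x => x) false).map
      (fun e => (e, (PySem.Dict.counter (wcL s k)).getD e 0))) ?_ ?_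
  · exact PySem.Dict.items_foldl_insert_fresh _ (fun e => e)
      (fun e => (PySem.Dict.counter (wcL s k)).getD e 0) _
      (fun a _ => PySem.Dict.contains_empty _) (by simpa using hnd)
  · simp [PySem.Dict.getD_counter]

-- the run scan on a <=-sorted list: keys strictly increasing, keys = members, run length = count
lemma wcRuns_spec (u : List String) (hp : u.Pairwise (· ≤ ·)) :
    ((wcRuns u).map Prod.fst).Pairwise (· < ·) ∧
    (∀ e, e ∈ (wcRuns u).map Prod.fst ↔ e ∈ u) ∧
    wcRuns u = ((wcRuns u).map Prod.fst).map (fun e => (e, (List.count e u : Int))) := by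
  match u with
  | [] => simp [wcRuns]
  | x :: r =>
    have hskip : List.dropWhile (fun y => y == x) (x :: r) = r.dropWhile (fun y => y == x) := by
      rw [List.dropWhile_cons]
      simp
    have hdec : x :: r = (x :: r).takeWhile (fun y => y == x) ++ List.dropWhile (fun y => y == x) (x :: r) :=
      (List.takeWhile_append_dropWhile).symm
    have hsub : (List.dropWhile (fun y => y == x) (x :: r)).Sublist (x :: r) := List.dropWhile_sublist _
    have hlen : (List.dropWhile (fun y => y == x) (x :: r)).length < (x :: r).length := by
      have := (List.dropWhile_sublist (l := r) (p := fun y => y == x)).length_le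
      rw [hskip]
      simp only [List.length_cons]
      omega
    have hle : ∀ y ∈ List.dropWhile (fun y => y == x) (x :: r), x ≤ y := by
      intro y hy
      rcases List.pairwise_cons.mp hp with ⟨hx, _⟩
      exact hx y ((List.dropWhile_sublist _).subset (hskip ▸ hy))
    have hgt : ∀ y ∈ List.dropWhile (fun y => y == x) (x :: r), x < y := by
      intro y hy
      cases ht : List.dropWhile (fun y => y == x) (x :: r) with
      | nil => rw [ht] at hy; cases hy
      | cons h t' =>
        have hne : (h == x) = false :=
          wc_dropWhile_head_false (fun y => y == x) (x :: r) ht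
        have hxh : x < h :=
          lt_of_le_of_ne (hle h (ht ▸ List.mem_cons_self)) (Ne.symm (beq_eq_false_iff_ne.mp hne))
        rw [ht] at hy
        rcases List.mem_cons.mp hy with rfl | hy'
        · exact hxh
        · have hpt : (List.dropWhile (fun y => y == x) (x :: r)).Pairwise (· ≤ ·) := hp.sublist hsub
          rw [ht] at hpt
          exact lt_of_lt_of_le hxh ((List.pairwise_cons.mp hpt).1 y hy')
    have hnotmem : x ∉ List.dropWhile (fun y => y == x) (x :: r) := fun hmem => lt_irrefl x (hgt x hmem)
    have htake : ∀ y ∈ (x :: r).takeWhile (fun y => y == x), y = x := by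
      intro y hy
      simpa using List.mem_takeWhile_imp hy
    have hcount : List.count x (x :: r) = (x :: r).length - (List.dropWhile (fun y => y == x) (x :: r)).length := by
      have h3 := congrArg List.length hdec
      rw [List.length_append] at h3
      conv_lhs => rw [hdec]
      rw [List.count_append]
      have h1 : List.count x ((x :: r).takeWhile (fun y => y == x)) =
          ((x :: r).takeWhile (fun y => y == x)).length :=
        List.count_eq_length.mpr (fun b hb => (htake b hb).symm)
      have h2 : List.count x (List.dropWhile (fun y => y == x) (x :: r)) = 0 := List.count_eq_zero.mpr hnotmem
      omega
    have hcnt_tail : ∀ e ∈ List.dropWhile (fun y => y == x) (x :: r),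
        List.count e (x :: r) = List.count e (List.dropWhile (fun y => y == x) (x :: r)) := by
      intro e he
      conv_lhs => rw [hdec]
      rw [List.count_append]
      have h0 : List.count e ((x :: r).takeWhile (fun y => y == x)) = 0 :=
        List.count_eq_zero.mpr (fun hmem => absurd (htake e hmem) (ne_of_gt (hgt e he)))
      omega
    obtain ⟨ihlt, ihmem, iheq⟩ := wcRuns_spec (List.dropWhile (fun y => y == x) (x :: r)) (hp.sublist hsub)
    have hrw : wcRuns (x :: r) =
        (x, ((x :: r).length : Int) - ((List.dropWhile (fun y => y == x) (x :: r)).length : Int)) ::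
          wcRuns (List.dropWhile (fun y => y == x) (x :: r)) := by
      rw [wcRuns]
    refine ⟨?_, ?_, ?_⟩
    · rw [hrw]
      simp only [List.map_cons, List.pairwise_cons]
      exact ⟨fun e he => hgt e ((ihmem e).mp he), ihlt⟩
    · intro e
      rw [hrw]
      simp only [List.map_cons, List.mem_cons, ihmem e]
      constructor
      · rintro (rfl | he)
        · exact Or.inl rfl
        · exact List.mem_cons.mp (hsub.subset he)
      · rintro (rfl | he)
        · exact Or.inl rfl
        · have hmem2 : e ∈ (x :: r).takeWhile (fun y => y == x) ++ List.dropWhile (fun y => y == x) (x :: r) :=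
            hdec ▸ (List.mem_cons_of_mem x he)
          rcases List.mem_append.mp hmem2 with h1 | h2
          · exact Or.inl (htake e h1)
          · exact Or.inr h2
    · rw [hrw]
      simp only [List.map_cons]
      congr 1
      · have hlenle := hsub.length_le
        have hcast : ((x :: r).length : Int) - ((List.dropWhile (fun y => y == x) (x :: r)).length : Int) =
            (List.count x (x :: r) : Int) := by
          rw [hcount]
          omega
        rw [hcast]
      · conv_lhs => rw [iheq]
        exact List.map_congr_left (fun e he => by
          rw [← hcnt_tail e ((ihmem e).mp he)])
termination_by u.length
decreasing_by exact hlen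

-- B's scan is the fold of its (value, run) pairs into the dict
lemma wcScan_eq_foldl : ∀ (u : List String) (run : Int) (R : PySem.Dict String Int),
    wcScan u run R = (wcRunsOff u run).foldl (fun d p => d.insert p.1 p.2) R := by
  intro u
  induction u with
  | nil => intro run R; rfl
  | cons x v ih =>
    intro run R
    cases v with
    | nil => rfl
    | cons y rest =>
      rw [wcScan, wcRunsOff]
      by_cases h : y == x
      · rw [if_pos h, if_pos h, ih]
      · rw [if_neg h, if_neg h, ih, List.foldl_cons]

-- one more equal head bumps the head run by one
lemma wcRuns_bump (x : String) (rest : List String) :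
    wcRuns (x :: x :: rest) =
      (match wcRuns (x :: rest) with
       | [] => []
       | (z, c) :: t => (z, c + 1) :: t) := by
  have hdw : List.dropWhile (fun z => z == x) (x :: x :: rest) =
      List.dropWhile (fun z => z == x) (x :: rest) := by
    conv_lhs => rw [List.dropWhile_cons]
    simp
  rw [wcRuns, wcRuns, hdw]
  dsimp only
  congr 2
  simp only [List.length_cons]
  push_cast
  ring

-- a different head starts a fresh run of length one
lemma wcRuns_new (x y : String) (rest : List String) (h : (y == x) = false) :
    wcRuns (x :: y :: rest) = (x, 1) :: wcRuns (y :: rest) := by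
  have hdw : List.dropWhile (fun z => z == x) (x :: y :: rest) = y :: rest := by
    rw [List.dropWhile_cons]
    simp only [BEq.rfl, if_pos]
    rw [List.dropWhile_cons, h]
    simp
  rw [wcRuns, hdw]
  congr 2
  simp only [List.length_cons]
  push_cast
  ring

-- a cons never groups to the empty list
lemma wcRuns_ne_nil (x : String) (r : List String) : wcRuns (x :: r) ≠ [] := by
  rw [wcRuns]
  exact List.cons_ne_nil _ _

-- B's scan pairs are the maximal runs, with the head run offset by the streak counter
lemma wcRunsOff_eq : ∀ (u : List String) (run : Int), u.Pairwise (· ≤ ·) →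
    wcRunsOff u run =
      (match wcRuns u with
       | [] => []
       | (x, c) :: t => (x, run + c) :: t) := by
  intro u
  induction u with
  | nil => intro run _; simp [wcRunsOff, wcRuns]
  | cons x v ih =>
    intro run hp
    cases v with
    | nil =>
      have h1 : wcRuns [x] = [(x, 1)] := by
        rw [wcRuns]
        simp [wcRuns, List.dropWhile]
      rw [show wcRunsOff [x] run = [(x, run + 1)] from rfl, h1]
    | cons y rest =>
      rw [wcRunsOff]
      by_cases h : (y == x) = true
      · have hyx : y = x := by simpa using h
        subst hyx
        rw [if_pos h, ih (run + 1) (hp.sublist (List.sublist_cons_self _ _)), wcRuns_bump]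
        cases hw : wcRuns (y :: rest) with
        | nil => exact absurd hw (wcRuns_ne_nil _ _)
        | cons p t =>
          cases p with
          | mk z c =>
            dsimp only
            congr 2
            ring
      · rw [if_neg (by simpa using h), ih 0 (hp.sublist (List.sublist_cons_self _ _)),
          wcRuns_new x y rest (by simpa using h)]
        dsimp only
        congr 1
        cases hw : wcRuns (y :: rest) with
        | nil => exact absurd hw (wcRuns_ne_nil _ _)
        | cons p t =>
          cases p with
          | mk z c =>
            dsimp only
            congr 2
            ring

-- B's result equals the same closed form
lemma word_composition_alt_eq (s : String) (k : Int) :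
    word_composition_alt s k =
      (PySem.List.sorted (PySem.Set.ofList (wcL s k)) (fun x => x) false).map
        (fun e => (e, (List.count e (wcL s k) : Int))) := by
  unfold word_composition_alt
  dsimp only
  rw [show (PySem.List.pyRange 0 ((PySem.Str.len s : Int) - k + 1) 1).map
      (fun i => String.mk (PySem.List.slice s.toList (some i) (some (i + k)))) = wcL s k from rfl]
  have hp : ((wcL s k).mergeSort (fun a b => decide (a ≤ b))).Pairwise (· ≤ ·) := by
    have h := List.pairwise_mergeSort (le := fun a b : String => decide (a ≤ b))
      (by intro a b c hab hbc; simp_all; exact le_trans hab hbc)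
      (by intro a b; simp [le_total]) (wcL s k)
    simpa using h
  obtain ⟨hlt, hmem, heq⟩ := wcRuns_spec ((wcL s k).mergeSort (fun a b => decide (a ≤ b))) hp
  have hscan : wcScan ((wcL s k).mergeSort (fun a b => decide (a ≤ b))) 0 PySem.Dict.empty =
      (wcRuns ((wcL s k).mergeSort (fun a b => decide (a ≤ b)))).foldl
        (fun d p => d.insert p.1 p.2) PySem.Dict.empty := by
    rw [wcScan_eq_foldl, wcRunsOff_eq _ 0 hp]
    cases hru : wcRuns ((wcL s k).mergeSort (fun a b => decide (a ≤ b))) with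
    | nil => rfl
    | cons p t => cases p; simp
  rw [hscan]
  have hnd : ((wcRuns ((wcL s k).mergeSort (fun a b => decide (a ≤ b)))).map Prod.fst).Nodup :=
    hlt.imp ne_of_lt
  have hperm : ((wcRuns ((wcL s k).mergeSort (fun a b => decide (a ≤ b)))).map Prod.fst).Perm
      (PySem.Set.ofList (wcL s k)) := by
    rw [List.perm_ext_iff_of_nodup hnd (PySem.Set.nodup_ofList _)]
    intro a
    rw [hmem a, List.mem_mergeSort, PySem.Set.mem_ofList]
  have hsorted : PySem.List.sorted (PySem.Set.ofList (wcL s k)) (fun x => x) false =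
      (wcRuns ((wcL s k).mergeSort (fun a b => decide (a ≤ b)))).map Prod.fst :=
    PySem.List.sorted_eq_of_perm_of_pairwise_lt _ _ _ hperm hlt
  refine Eq.trans (b := (wcRuns ((wcL s k).mergeSort (fun a b => decide (a ≤ b)))).map
      (fun a => (a.1, a.2))) ?_ ?_
  · exact PySem.Dict.items_foldl_insert_fresh _ Prod.fst Prod.snd _
      (fun a _ => PySem.Dict.contains_empty _) hnd
  · have hid : (wcRuns ((wcL s k).mergeSort (fun a b => decide (a ≤ b)))).map
        (fun a : String × Int => (a.1, a.2)) =
        wcRuns ((wcL s k).mergeSort (fun a b => decide (a ≤ b))) := by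
      simp
    rw [hid, hsorted]
    conv_lhs => rw [heq]
    exact List.map_congr_left (fun e he => by
      rw [List.Perm.count_eq (List.mergeSort_perm (wcL s k) (fun a b => decide (a ≤ b))) e])

-- ===== VERDICT (by name: the statement is the Claim_ definition above) =====
theorem word_composition_spec : Claim_equal_word_composition := by
  intro s k _
  unfold Spec_word_composition
  rw [word_composition_eq, word_composition_alt_eq]
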